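-- pv_equiv track=rewrite | github.com/vitorueno/alpha-beta-checkers | simpleCheckers.py | avaliar
-- ===== SOURCE A (Python) =====
-- EMPTY = '.'
--
-- def avaliar(tabuleiro, jogador):
--     """Avalia o tabuleiro para o jogador atual."""
--     pontuacao = 0
--     for linha in tabuleiro:
--         for peca in linha:
--             if peca.lower() == jogador:
--                 pontuacao += 3 if peca.isupper() else 1
--             elif peca != EMPTY:
--                 pontuacao -= 3 if peca.isupper() else 1
--     return pontuacao
-- ===== SOURCE B (Python) =====
-- EMPTY = '.'
--
-- def avaliar(tabuleiro, jogador):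
--     """Avalia o tabuleiro para o jogador atual."""
--     counts = {}
--     for linha in tabuleiro:
--         for peca in linha:
--             counts[peca] = counts.get(peca, 0) + 1
--     pontuacao = 0
--     for peca, n in counts.items():
--         if peca.lower() == jogador:
--             sinal = 1
--         elif peca != EMPTY:
--             sinal = -1
--         else:
--             sinal = 0
--         pontuacao += sinal * (3 if peca.isupper() else 1) * n
--     return pontuacao
-- ===== Notes on version B (the rewrite author's own statement) =====
-- stated objective: alternative
-- what changed: B first builds a frequency dictionary of piece strings over all cells in one pass, then scores each distinct piece once (sign times weight times count) instead of branching per cell.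
import Mathlib
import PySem

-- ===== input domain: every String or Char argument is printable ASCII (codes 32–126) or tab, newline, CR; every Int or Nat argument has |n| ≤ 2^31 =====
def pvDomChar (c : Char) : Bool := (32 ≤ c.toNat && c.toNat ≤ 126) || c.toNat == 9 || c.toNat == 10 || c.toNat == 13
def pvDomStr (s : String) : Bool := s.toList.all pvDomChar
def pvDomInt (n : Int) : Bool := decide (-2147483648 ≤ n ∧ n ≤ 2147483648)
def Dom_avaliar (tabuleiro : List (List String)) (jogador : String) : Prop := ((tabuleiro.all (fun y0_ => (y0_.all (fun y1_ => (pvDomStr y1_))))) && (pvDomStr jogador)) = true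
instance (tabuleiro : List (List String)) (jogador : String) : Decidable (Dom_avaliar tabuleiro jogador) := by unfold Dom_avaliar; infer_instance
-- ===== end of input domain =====

-- B scores each DISTINCT piece string once from a frequency dictionary instead of branching per cell; same cost, different decomposition.

-- Python str.isupper(): at least one cased character and no lowercase one (exact on the ASCII domain, where cased = letter)
def pyStrIsupper (s : String) : Bool :=
  s.toList.any (fun c => PySem.Chars.isupper c || PySem.Chars.islower c) &&
  s.toList.all (fun c => !PySem.Chars.islower c)

-- ===== PORT A =====
def avaliar (tabuleiro : List (List String)) (jogador : String) : Int :=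
  tabuleiro.foldl (fun pontuacao linha =>
    linha.foldl (fun pontuacao peca =>
      if PySem.Str.lower peca == jogador then
        pontuacao + (if pyStrIsupper peca then 3 else 1)
      else if peca ≠ "." then
        pontuacao - (if pyStrIsupper peca then 3 else 1)
      else pontuacao) pontuacao) 0

-- ===== PORT B =====
def avaliar_alt (tabuleiro : List (List String)) (jogador : String) : Int :=
  let counts : PySem.Dict String Int :=
    tabuleiro.foldl (fun d linha =>
      linha.foldl (fun d peca => d.insert peca (d.getD peca 0 + 1)) d) PySem.Dict.empty
  counts.items.foldl (fun pontuacao p =>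
    let sinal : Int :=
      if PySem.Str.lower p.1 == jogador then 1
      else if p.1 ≠ "." then -1
      else 0
    pontuacao + sinal * (if pyStrIsupper p.1 then 3 else 1) * p.2) 0

-- ===== PRECONDITION & SPEC =====
def Spec_avaliar (tabuleiro : List (List String)) (jogador : String) (out : Int) : Prop := out = avaliar_alt tabuleiro jogador
instance (tabuleiro : List (List String)) (jogador : String) (out : Int) : Decidable (Spec_avaliar tabuleiro jogador out) := by unfold Spec_avaliar; infer_instance

-- ===== CLAIM (what is proved, stated in full; the proofs are below) =====
def Claim_equal_avaliar : Prop := ∀ (tabuleiro : List (List String)) (jogador : String), Dom_avaliar tabuleiro jogador → Spec_avaliar tabuleiro jogador (avaliar tabuleiro jogador)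

-- ===== LEMMAS AND PROOFS =====

-- per-cell score (used only by the proofs)
def cellScore (jogador : String) (peca : String) : Int :=
  (if PySem.Str.lower peca == jogador then 1
   else if peca ≠ "." then -1
   else 0) * (if pyStrIsupper peca then 3 else 1)

lemma flat_sum (t : List (List String)) (f : String → Int) :
    (t.map (fun l => (l.map f).sum)).sum = ((t.flatMap id).map f).sum := by
  induction t with
  | nil => rfl
  | cons h tl ih => simp [List.flatMap_cons, ih]

lemma counter_fold (t : List (List String)) (d : PySem.Dict String Int) :
    t.foldl (fun d linha => linha.foldl (fun d peca => d.insert peca (d.getD peca 0 + 1)) d) d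
      = (t.flatMap id).foldl (fun d x => d.insert x (d.getD x 0 + 1)) d := by
  induction t generalizing d with
  | nil => rfl
  | cons h tl ih => simp [List.flatMap_cons, List.foldl_append, ih]

lemma avaliar_eq_sum (tabuleiro : List (List String)) (jogador : String) :
    avaliar tabuleiro jogador
      = ((tabuleiro.flatMap id).map (cellScore jogador)).sum := by
  unfold avaliar
  have hstep : ∀ (linha : List String) (a : Int),
      linha.foldl (fun pontuacao peca =>
        if PySem.Str.lower peca == jogador then
          pontuacao + (if pyStrIsupper peca then 3 else 1)
        else if peca ≠ "." then
          pontuacao - (if pyStrIsupper peca then 3 else 1)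
        else pontuacao) a
      = a + (linha.map (cellScore jogador)).sum := by
    intro linha a
    have : (fun (pontuacao : Int) (peca : String) =>
        if PySem.Str.lower peca == jogador then
          pontuacao + (if pyStrIsupper peca then 3 else 1)
        else if peca ≠ "." then
          pontuacao - (if pyStrIsupper peca then 3 else 1)
        else pontuacao)
      = (fun (pontuacao : Int) (peca : String) => pontuacao + cellScore jogador peca) := by
      funext acc peca
      unfold cellScore
      split_ifs <;> ring
    rw [this, PySem.List.foldl_add]
  have : tabuleiro.foldl (fun pontuacao linha =>
      linha.foldl (fun pontuacao peca =>
        if PySem.Str.lower peca == jogador then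
          pontuacao + (if pyStrIsupper peca then 3 else 1)
        else if peca ≠ "." then
          pontuacao - (if pyStrIsupper peca then 3 else 1)
        else pontuacao) pontuacao) 0
      = tabuleiro.foldl (fun pontuacao linha =>
          pontuacao + (linha.map (cellScore jogador)).sum) 0 := by
    congr 1
    funext a linha
    exact hstep linha a
  rw [this, PySem.List.foldl_add, zero_add, flat_sum]
lemma avaliar_alt_eq_sum (tabuleiro : List (List String)) (jogador : String) :
    avaliar_alt tabuleiro jogador
      = ((PySem.Set.ofList (tabuleiro.flatMap id)).map
          (fun k => cellScore jogador k * ((tabuleiro.flatMap id).count k : Int))).sum := by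
  unfold avaliar_alt
  have hcounts : tabuleiro.foldl (fun d linha =>
      linha.foldl (fun d peca => d.insert peca (d.getD peca 0 + 1)) d) PySem.Dict.empty
      = PySem.Dict.counter (κ := String) (tabuleiro.flatMap id) := by
    rw [← PySem.Dict.foldl_insert_getD_add_one_eq_counter, counter_fold]
  simp only [hcounts, PySem.Dict.items_counter]
  rw [PySem.List.foldl_add, List.map_map, zero_add]
  apply congrArg List.sum
  apply List.map_congr_left
  intro k _
  show (((if (PySem.Str.lower k == jogador) = true then (1:Int) else if k ≠ "." then -1 else 0) *
      if pyStrIsupper k = true then 3 else 1) * ((tabuleiro.flatMap id).count k : Int))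
      = cellScore jogador k * ((tabuleiro.flatMap id).count k : Int)
  unfold cellScore
  ring

lemma sum_dedup_count (l : List String) (f : String → Int) :
    ((PySem.Set.ofList l).map (fun k => f k * (l.count k : Int))).sum
      = (l.map f).sum := by
  have hnd : (PySem.Set.ofList l : List String).Nodup := PySem.Set.nodup_ofList l
  rw [← List.sum_toFinset _ hnd]
  have hfs : (PySem.Set.ofList l : List String).toFinset = l.toFinset := by
    ext x; simp [PySem.Set.mem_ofList]
  rw [hfs]
  have h := Finset.sum_multiset_map_count (l : Multiset String) f
  simp only [Multiset.coe_count, Multiset.map_coe, Multiset.sum_coe] at h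
  rw [h]
  simp [mul_comm]

-- ===== VERDICT (by name: the statement is the Claim_ definition above) =====
theorem avaliar_spec : Claim_equal_avaliar := by
  intro tabuleiro jogador _
  unfold Spec_avaliar
  rw [avaliar_eq_sum, avaliar_alt_eq_sum, sum_dedup_count]
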